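-- pv_equiv track=rewrite | github.com/lukacslacko/csaszar | rotation_z6.py | verify_manifold
-- ===== SOURCE A (Python) =====
-- def link_is_cycle(vertex, faces_containing):
--     link_edges, link_verts = [], set()
--     for face in faces_containing:
--         opp = [x for x in face if x != vertex]
--         link_edges.append(tuple(sorted(opp)))
--         link_verts.update(opp)
--     deg = {v: 0 for v in link_verts}
--     for (a, b) in link_edges:
--         deg[a] += 1; deg[b] += 1
--     if any(d != 2 for d in deg.values()): return False
--     adj = {v: [] for v in link_verts}
--     for (a, b) in link_edges:
--         adj[a].append(b); adj[b].append(a)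
--     start = next(iter(link_verts))
--     seen = {start}; stk = [start]
--     while stk:
--         u = stk.pop()
--         for w in adj[u]:
--             if w not in seen:
--                 seen.add(w); stk.append(w)
--     return len(seen) == len(link_verts)
--
-- def verify_manifold(unique_faces, N=12):
--     edges = set()
--     ec = {}
--     for (a, b, c) in unique_faces:
--         for u, v in ((a, b), (b, c), (a, c)):
--             e = tuple(sorted((u, v)))
--             edges.add(e)
--             ec[e] = ec.get(e, 0) + 1
--     if not all(c == 2 for c in ec.values()): return False
--     if len(edges) != N * (N - 1) // 2: return False
--     incident = {v: [] for v in range(N)}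
--     for f in unique_faces:
--         for v in f:
--             incident[v].append(f)
--     for v in range(N):
--         if not link_is_cycle(v, incident[v]): return False
--     return True
-- ===== SOURCE B (Python) =====
-- def _link_is_single_cycle(vertex, faces):
--     # degrees and link edges in one pass over the incident faces
--     deg = {}
--     edges = []
--     for f in faces:
--         u, v = [x for x in f if x != vertex]
--         edges.append((u, v))
--         deg[u] = deg.get(u, 0) + 1
--         deg[v] = deg.get(v, 0) + 1
--     if any(d != 2 for d in deg.values()):
--         return False
--     verts = list(deg)
--     adj = {x: [] for x in verts}
--     for (u, v) in edges:
--         adj[u].append(v)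
--         adj[v].append(u)
--     # saturate the component of one link vertex (set-at-a-time closure)
--     comp = {verts[0]}
--     for _ in range(len(verts)):
--         comp |= {w for u in comp for w in adj[u]}
--     return len(comp) == len(verts)
--
-- def verify_manifold(unique_faces, N=12):
--     ec = {}
--     for (a, b, c) in unique_faces:
--         for (u, v) in ((a, b), (b, c), (a, c)):
--             e = (u, v) if u <= v else (v, u)
--             ec[e] = ec.get(e, 0) + 1
--     if any(c != 2 for c in ec.values()):
--         return False
--     if 2 * len(ec) != N * (N - 1):
--         return False
--     for v in range(N):
--         if not _link_is_single_cycle(v, [f for f in unique_faces if v in f]):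
--             return False
--     return True
-- ===== Notes on version B (the rewrite author's own statement) =====
-- stated objective: alternative
-- what changed: B drops the incident-faces dict for a per-vertex filter and replaces the explicit-stack DFS flood of each vertex link by a set-at-a-time closure (repeatedly unioning in all neighbours of the current component), keeping the edge-count checks; the degree map and link edges are built in one pass instead of three.
import Mathlib
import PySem

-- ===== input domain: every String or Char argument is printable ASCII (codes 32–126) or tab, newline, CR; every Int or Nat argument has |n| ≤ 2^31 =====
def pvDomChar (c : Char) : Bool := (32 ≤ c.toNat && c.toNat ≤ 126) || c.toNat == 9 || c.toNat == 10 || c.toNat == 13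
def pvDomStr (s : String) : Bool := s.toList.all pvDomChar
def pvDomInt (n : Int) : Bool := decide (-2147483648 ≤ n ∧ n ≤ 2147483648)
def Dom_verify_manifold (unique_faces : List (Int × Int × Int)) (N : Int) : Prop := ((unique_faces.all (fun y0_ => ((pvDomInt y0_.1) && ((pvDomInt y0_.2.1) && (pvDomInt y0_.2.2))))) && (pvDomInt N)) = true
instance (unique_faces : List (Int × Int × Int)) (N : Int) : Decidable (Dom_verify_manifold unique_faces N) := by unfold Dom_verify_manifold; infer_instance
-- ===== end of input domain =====

-- B replaces the DFS flood of each vertex link by a set-at-a-time closure (and drops the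
-- incident-faces dict for a per-vertex filter): an alternative formulation of the same check.


-- ===== PORT A =====
-- tuple(sorted((u, v))) on a pair of ints
def pvSortPair (u v : Int) : Int × Int := if u ≤ v then (u, v) else (v, u)

-- the DFS while-loop of link_is_cycle; fuel 2*|link_verts| always suffices (each iteration
-- pops one entry and every vertex is pushed at most once)
def pvDfsA (adj : PySem.Dict Int (List Int)) : Nat → PySem.Set Int → List Int → PySem.Set Int
  | _, seen, [] => seen
  | 0, seen, _ => seen
  | fuel + 1, seen, u :: rest =>
      let st := (adj.getD u []).foldl
        (fun (st : PySem.Set Int × List Int) w =>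
          if w ∈ st.1 then st else (PySem.Set.add st.1 w, w :: st.2)) (seen, rest)
      pvDfsA adj fuel st.1 st.2

def pvLinkIsCycleA (vertex : Int) (faces_containing : List (Int × Int × Int)) : Bool :=
  let st := faces_containing.foldl
    (fun (st : List (List Int) × PySem.Set Int) f =>
      let opp := [f.1, f.2.1, f.2.2].filter (fun x => x ≠ vertex)
      (st.1 ++ [PySem.List.sorted opp (fun x => x) false], PySem.Set.update st.2 opp))
    ([], PySem.Set.empty)
  let link_edges := st.1
  let link_verts := st.2
  let deg0 := link_verts.foldl (fun d v => d.insert v (0 : Int)) PySem.Dict.empty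
  let deg := link_edges.foldl
    (fun d e => match e with
      | [a, b] => (d.modify a 0 (· + 1)).modify b 0 (· + 1)
      | _ => d)  -- Python raises ValueError here (outside Pre_)
    deg0
  if deg.values.any (fun d => d ≠ 2) then false
  else
    let adj0 := link_verts.foldl (fun d v => d.insert v ([] : List Int)) PySem.Dict.empty
    let adj := link_edges.foldl
      (fun d e => match e with
        | [a, b] => (d.modify a [] (· ++ [b])).modify b [] (· ++ [a])
        | _ => d)  -- ValueError (outside Pre_)
      adj0
    match link_verts with
    | [] => false  -- Python raises StopIteration here (outside Pre_)
    | start :: _ =>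
      let seen := pvDfsA adj (2 * link_verts.length) (PySem.Set.add PySem.Set.empty start) [start]
      seen.length == link_verts.length

def verify_manifold (unique_faces : List (Int × Int × Int)) (N : Int) : Bool :=
  let st := unique_faces.foldl
    (fun (st : PySem.Set (Int × Int) × PySem.Dict (Int × Int) Int) f =>
      [(f.1, f.2.1), (f.2.1, f.2.2), (f.1, f.2.2)].foldl
        (fun (st : PySem.Set (Int × Int) × PySem.Dict (Int × Int) Int) uv =>
          let e := pvSortPair uv.1 uv.2
          (PySem.Set.add st.1 e, st.2.insert e (st.2.getD e 0 + 1))) st)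
    (PySem.Set.empty, PySem.Dict.empty)
  let edges := st.1
  let ec := st.2
  if ¬ (ec.values.all (fun c => c == 2)) then false
  else if (edges.length : Int) ≠ PySem.Int.floordiv (N * (N - 1)) 2 then false
  else
    let incident0 := (PySem.List.pyRange 0 N 1).foldl
      (fun d v => d.insert v ([] : List (Int × Int × Int))) PySem.Dict.empty
    let incident := unique_faces.foldl
      (fun d f => [f.1, f.2.1, f.2.2].foldl (fun d v => d.modify v [] (· ++ [f])) d)
      incident0
    (PySem.List.pyRange 0 N 1).all (fun v => pvLinkIsCycleA v (incident.getD v []))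

-- ===== PORT B =====
def pvLinkIsCycleB (vertex : Int) (faces : List (Int × Int × Int)) : Bool :=
  let st := faces.foldl
    (fun (st : PySem.Dict Int Int × List (Int × Int)) f =>
      match [f.1, f.2.1, f.2.2].filter (fun x => x ≠ vertex) with
      | [u, v] =>
          let d1 := st.1.insert u (st.1.getD u 0 + 1)
          let d2 := d1.insert v (d1.getD v 0 + 1)
          (d2, st.2 ++ [(u, v)])
      | _ => st)  -- Python raises ValueError here (outside Pre_)
    (PySem.Dict.empty, [])
  let deg := st.1
  let edges := st.2
  if deg.values.any (fun d => d ≠ 2) then false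
  else
    let verts := deg.keys
    let adj0 := verts.foldl (fun d x => d.insert x ([] : List Int)) PySem.Dict.empty
    let adj := edges.foldl
      (fun d e => (d.modify e.1 [] (· ++ [e.2])).modify e.2 [] (· ++ [e.1])) adj0
    match verts with
    | [] => false  -- Python raises IndexError here (outside Pre_)
    | v0 :: _ =>
      let comp := (List.range verts.length).foldl
        (fun (comp : PySem.Set Int) _ =>
          PySem.Set.union comp
            (PySem.Set.ofList (comp.foldl (fun acc u => acc ++ adj.getD u []) [])))
        (PySem.Set.add PySem.Set.empty v0)
      comp.length == verts.length

def verify_manifold_alt (unique_faces : List (Int × Int × Int)) (N : Int) : Bool :=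
  let ec := unique_faces.foldl
    (fun (d : PySem.Dict (Int × Int) Int) f =>
      [(f.1, f.2.1), (f.2.1, f.2.2), (f.1, f.2.2)].foldl
        (fun d uv =>
          let e := if uv.1 ≤ uv.2 then uv else (uv.2, uv.1)
          d.insert e (d.getD e 0 + 1)) d)
    PySem.Dict.empty
  if ec.values.any (fun c => c ≠ 2) then false
  else if 2 * (ec.size : Int) ≠ N * (N - 1) then false
  else
    (PySem.List.pyRange 0 N 1).all
      (fun v => pvLinkIsCycleB v
        (unique_faces.filter (fun f => v = f.1 ∨ v = f.2.1 ∨ v = f.2.2)))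

-- ===== PRECONDITION & SPEC =====
-- the multiset of (sorted) edges the Python derives from the faces
def pvEdgeStream (faces : List (Int × Int × Int)) : List (Int × Int) :=
  faces.flatMap (fun f => [pvSortPair f.1 f.2.1, pvSortPair f.2.1 f.2.2, pvSortPair f.1 f.2.2])

-- Pre_ excludes exactly the inputs on which A raises: whenever the two edge checks would pass
-- (every derived edge occurs twice and there are N*(N-1)/2 distinct ones), the faces must be
-- triples of distinct vertices inside range(N) and N ≠ 1 — otherwise A hits a KeyError,
-- ValueError or StopIteration in the per-vertex link pass.
def Pre_verify_manifold (unique_faces : List (Int × Int × Int)) (N : Int) : Prop :=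
  ((∀ e ∈ pvEdgeStream unique_faces, (pvEdgeStream unique_faces).count e = 2) ∧
    2 * ((PySem.Set.ofList (pvEdgeStream unique_faces)).length : Int) = N * (N - 1)) →
  ((∀ f ∈ unique_faces,
      (f.1 ≠ f.2.1 ∧ f.2.1 ≠ f.2.2 ∧ f.1 ≠ f.2.2) ∧
      (0 ≤ f.1 ∧ f.1 < N ∧ 0 ≤ f.2.1 ∧ f.2.1 < N ∧ 0 ≤ f.2.2 ∧ f.2.2 < N)) ∧ N ≠ 1)

instance (unique_faces : List (Int × Int × Int)) (N : Int) :
    Decidable (Pre_verify_manifold unique_faces N) := by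
  unfold Pre_verify_manifold; infer_instance

def pvWitness_verify_manifold : (List (Int × Int × Int)) × Int :=
  ([(0, 1, 2), (0, 1, 3), (0, 2, 3), (1, 2, 3)], 4)

def Spec_verify_manifold (unique_faces : List (Int × Int × Int)) (N : Int) (out : Bool) : Prop := out = verify_manifold_alt unique_faces N
instance (unique_faces : List (Int × Int × Int)) (N : Int) (out : Bool) : Decidable (Spec_verify_manifold unique_faces N out) := by unfold Spec_verify_manifold; infer_instance

-- ===== CLAIM (what is proved, stated in full; the proofs are below) =====
def Claim_equal_verify_manifold : Prop := ∀ (unique_faces : List (Int × Int × Int)) (N : Int), Dom_verify_manifold unique_faces N → Pre_verify_manifold unique_faces N → Spec_verify_manifold unique_faces N (verify_manifold unique_faces N)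

-- ===== LEMMAS AND PROOFS =====


-- length of a nodup list is at most that of any list containing it
theorem pv_nodup_length_le {l l' : List Int} (h1 : l.Nodup) (h2 : ∀ x ∈ l, x ∈ l') :
    l.length ≤ l'.length := by
  calc l.length = l.toFinset.card := (List.toFinset_card_of_nodup h1).symm
    _ ≤ l'.toFinset.card := Finset.card_le_card (by
        intro x hx
        simp only [List.mem_toFinset] at hx ⊢
        exact h2 x hx)
    _ ≤ l'.length := l'.toFinset_card_le

theorem pv_nodup_mem_of_le_length {l l' : List Int} (h1 : l.Nodup) (h1' : l'.Nodup)
    (h2 : ∀ x ∈ l, x ∈ l') (h3 : l'.length ≤ l.length) : ∀ x ∈ l', x ∈ l := by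
  have hsub : l.toFinset ⊆ l'.toFinset := by
    intro x hx; simp only [List.mem_toFinset] at hx ⊢; exact h2 x hx
  have hcard : l'.toFinset.card ≤ l.toFinset.card := by
    rw [List.toFinset_card_of_nodup h1, List.toFinset_card_of_nodup h1']
    exact h3
  have := Finset.eq_of_subset_of_card_le hsub hcard
  intro x hx
  have : x ∈ l.toFinset := this ▸ (List.mem_toFinset.2 hx)
  exact List.mem_toFinset.1 this

theorem pv_push_spec (nbrs : List Int) :
    ∀ (seen : PySem.Set Int) (stk : List Int), seen.Nodup →
    (nbrs.foldl (fun (st : PySem.Set Int × List Int) w =>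
        if w ∈ st.1 then st else (PySem.Set.add st.1 w, w :: st.2)) (seen, stk)).1
      = PySem.Set.update seen nbrs ∧
    (∀ x ∈ stk, x ∈ (nbrs.foldl (fun (st : PySem.Set Int × List Int) w =>
        if w ∈ st.1 then st else (PySem.Set.add st.1 w, w :: st.2)) (seen, stk)).2) ∧
    (∀ x ∈ (nbrs.foldl (fun (st : PySem.Set Int × List Int) w =>
        if w ∈ st.1 then st else (PySem.Set.add st.1 w, w :: st.2)) (seen, stk)).2,
      x ∈ stk ∨ (x ∈ nbrs ∧ x ∉ seen)) ∧
    (∀ x ∈ nbrs, x ∉ seen → x ∈ (nbrs.foldl (fun (st : PySem.Set Int × List Int) w =>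
        if w ∈ st.1 then st else (PySem.Set.add st.1 w, w :: st.2)) (seen, stk)).2) ∧
    ((nbrs.foldl (fun (st : PySem.Set Int × List Int) w =>
        if w ∈ st.1 then st else (PySem.Set.add st.1 w, w :: st.2)) (seen, stk)).1.length + stk.length
      = seen.length + (nbrs.foldl (fun (st : PySem.Set Int × List Int) w =>
        if w ∈ st.1 then st else (PySem.Set.add st.1 w, w :: st.2)) (seen, stk)).2.length) := by
  induction nbrs with
  | nil =>
    intro seen stk hnd
    refine ⟨rfl, fun x hx => hx, fun x hx => Or.inl hx, fun x hx => absurd hx (by simp), rfl⟩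
  | cons w t ih =>
    intro seen stk hnd
    simp only [List.foldl_cons]
    by_cases hw : w ∈ seen
    · simp only [if_pos hw]
      obtain ⟨a, b, c, d, e⟩ := ih seen stk hnd
      refine ⟨?_, b, ?_, ?_, e⟩
      · rw [a, PySem.Set.update_cons, PySem.Set.add_of_mem hw]
      · intro x hx
        rcases c x hx with h | ⟨h1, h2⟩
        · exact Or.inl h
        · exact Or.inr ⟨List.mem_cons_of_mem _ h1, h2⟩
      · intro x hx hns
        rcases List.mem_cons.1 hx with rfl | hx
        · exact absurd hw hns
        · exact d x hx hns
    · simp only [if_neg hw]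
      obtain ⟨a, b, c, d, e⟩ := ih (PySem.Set.add seen w) (w :: stk) (PySem.Set.nodup_add _ _ hnd)
      have hwadd : w ∈ PySem.Set.add seen w := by rw [PySem.Set.mem_add _ _ _]; exact Or.inr rfl
      refine ⟨?_, ?_, ?_, ?_, ?_⟩
      · rw [a, PySem.Set.update_cons]
      · intro x hx; exact b x (List.mem_cons_of_mem _ hx)
      · intro x hx
        rcases c x hx with h | ⟨h1, h2⟩
        · rcases List.mem_cons.1 h with rfl | h
          · exact Or.inr ⟨List.mem_cons_self .., hw⟩
          · exact Or.inl h
        · refine Or.inr ⟨List.mem_cons_of_mem _ h1, fun hs => h2 ?_⟩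
          rw [PySem.Set.mem_add _ _ _]; exact Or.inl hs
      · intro x hx hns
        rcases List.mem_cons.1 hx with rfl | hx
        · exact b x (List.mem_cons_self ..)
        · by_cases hxa : x ∈ PySem.Set.add seen w
          · rcases (PySem.Set.mem_add _ _ _).1 hxa with h | rfl
            · exact absurd h hns
            · exact b x (List.mem_cons_self ..)
          · exact d x hx hxa
      · have : (PySem.Set.add seen w).length = seen.length + 1 := by
          rw [PySem.Set.add_of_not_mem hw, List.length_append]; rfl
        simp only [List.length_cons] at e ⊢
        omega

theorem pv_dfs_spec (adj : PySem.Dict Int (List Int)) (V : List Int)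
    (hV : ∀ x w : Int, w ∈ adj.getD x [] → w ∈ V) :
    ∀ (fuel : Nat) (seen : PySem.Set Int) (stk : List Int),
    seen.Nodup → (∀ x ∈ stk, x ∈ seen) → (∀ x ∈ seen, x ∈ V) →
    stk.length + 2 * (V.length - seen.length) ≤ fuel →
    (∀ u, u ∈ seen → u ∉ stk → ∀ w, w ∈ adj.getD u [] → w ∈ seen) →
    ((∀ x ∈ seen, x ∈ pvDfsA adj fuel seen stk) ∧
     (pvDfsA adj fuel seen stk).Nodup ∧
     (∀ x ∈ pvDfsA adj fuel seen stk, x ∈ V) ∧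
     (∀ x ∈ pvDfsA adj fuel seen stk, x ∈ seen ∨
        ∃ u ∈ seen, Relation.ReflTransGen (fun a b => b ∈ adj.getD a []) u x) ∧
     (∀ u ∈ pvDfsA adj fuel seen stk, ∀ w, w ∈ adj.getD u [] → w ∈ pvDfsA adj fuel seen stk)) := by
  intro fuel
  induction fuel with
  | zero =>
    intro seen stk hnd hss hsV hm hinv
    match stk, hm with
    | [], _ =>
      rw [pvDfsA]
      exact ⟨fun x hx => hx, hnd, hsV, fun x hx => Or.inl hx,
        fun u hu w hw => hinv u hu (by simp) w hw⟩
    | u :: rest, hm => simp at hm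
  | succ fuel ih =>
    intro seen stk hnd hss hsV hm hinv
    match stk with
    | [] =>
      rw [pvDfsA]
      exact ⟨fun x hx => hx, hnd, hsV, fun x hx => Or.inl hx,
        fun u hu w hw => hinv u hu (by simp) w hw⟩
    | u :: rest =>
      rw [pvDfsA]
      obtain ⟨ha, hb, hc, hd, he⟩ := pv_push_spec (adj.getD u []) seen rest hnd
      set st := (adj.getD u []).foldl
        (fun (st : PySem.Set Int × List Int) w =>
          if w ∈ st.1 then st else (PySem.Set.add st.1 w, w :: st.2)) (seen, rest) with hst
      have hu_seen : u ∈ seen := hss u (List.mem_cons_self ..)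
      have hmem1 : ∀ x, x ∈ st.1 ↔ x ∈ seen ∨ x ∈ adj.getD u [] := by
        intro x; rw [ha]; exact PySem.Set.mem_update _ _ _
      have hnd' : st.1.Nodup := by
        rw [ha]; exact PySem.Set.nodup_update _ _ hnd
      have hss' : ∀ x ∈ st.2, x ∈ st.1 := by
        intro x hx
        rcases hc x hx with h | ⟨h1, _⟩
        · exact (hmem1 x).2 (Or.inl (hss x (List.mem_cons_of_mem _ h)))
        · exact (hmem1 x).2 (Or.inr h1)
      have hsV' : ∀ x ∈ st.1, x ∈ V := by
        intro x hx
        rcases (hmem1 x).1 hx with h | h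
        · exact hsV x h
        · exact hV u x h
      have hseen_sub : ∀ x ∈ seen, x ∈ st.1 := fun x hx => (hmem1 x).2 (Or.inl hx)
      have hlen1 : seen.length ≤ st.1.length := by
        rw [ha, PySem.Set.update_eq_append_filter, List.length_append]; omega
      have hlenV : st.1.length ≤ V.length := pv_nodup_length_le hnd' hsV'
      have hm' : st.2.length + 2 * (V.length - st.1.length) ≤ fuel := by
        simp only [List.length_cons] at hm
        omega
      have hinv' : ∀ z, z ∈ st.1 → z ∉ st.2 → ∀ w, w ∈ adj.getD z [] → w ∈ st.1 := by
        intro z hz hzs w hw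
        by_cases hzseen : z ∈ seen
        · by_cases hzu : z = u
          · subst hzu; exact (hmem1 w).2 (Or.inr hw)
          · have hzrest : z ∉ rest := fun h => hzs (hb z h)
            have : z ∉ (u :: rest) := by
              intro h; rcases List.mem_cons.1 h with h | h
              · exact hzu h
              · exact hzrest h
            exact hseen_sub w (hinv z hzseen this w hw)
        · rcases (hmem1 z).1 hz with h | h
          · exact absurd h hzseen
          · exact absurd (hd z h hzseen) hzs
      obtain ⟨r1, r2, r3, r4, r5⟩ := ih st.1 st.2 hnd' hss' hsV' hm' hinv'
      refine ⟨fun x hx => r1 x (hseen_sub x hx), r2, r3, ?_, r5⟩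
      intro x hx
      rcases r4 x hx with h | ⟨w, hw, hreach⟩
      · rcases (hmem1 x).1 h with h | h
        · exact Or.inl h
        · exact Or.inr ⟨u, hu_seen, Relation.ReflTransGen.single h⟩
      · rcases (hmem1 w).1 hw with h | h
        · exact Or.inr ⟨w, h, hreach⟩
        · exact Or.inr ⟨u, hu_seen, Relation.ReflTransGen.head h hreach⟩

theorem pv_dfs_reach (adj : PySem.Dict Int (List Int)) (V : List Int)
    (hV : ∀ x w : Int, w ∈ adj.getD x [] → w ∈ V)
    (start : Int) (hstart : start ∈ V) :
    ((pvDfsA adj (2 * V.length) (PySem.Set.add PySem.Set.empty start) [start]).Nodup ∧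
     ∀ x, x ∈ pvDfsA adj (2 * V.length) (PySem.Set.add PySem.Set.empty start) [start] ↔
       Relation.ReflTransGen (fun a b => b ∈ adj.getD a []) start x) := by
  have hseen : (PySem.Set.add PySem.Set.empty start) = [start] := rfl
  have hVpos : 1 ≤ V.length := List.length_pos_of_mem hstart
  obtain ⟨r1, r2, r3, r4, r5⟩ := pv_dfs_spec adj V hV (2 * V.length)
    (PySem.Set.add PySem.Set.empty start) [start]
    (by rw [hseen]; exact List.nodup_singleton _)
    (by intro x hx; exact hx)
    (by rw [hseen]; intro x hx; rw [List.mem_singleton] at hx; exact hx ▸ hstart)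
    (by rw [hseen]; simp only [List.length_singleton]; omega)
    (by rw [hseen]; intro u hu hnu; exact absurd hu hnu)
  refine ⟨r2, fun x => ⟨?_, ?_⟩⟩
  · intro hx
    rcases r4 x hx with h | ⟨u, hu, hreach⟩
    · rw [hseen, List.mem_singleton] at h; exact h ▸ Relation.ReflTransGen.refl
    · rw [hseen, List.mem_singleton] at hu; exact hu ▸ hreach
  · intro hreach
    induction hreach with
    | refl => exact r1 start (by rw [hseen]; exact List.mem_singleton.2 rfl)
    | tail _ hstep ihr => exact r5 _ ihr _ hstep

-- one saturation step of B's closure loop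
def pvGrow (adj : PySem.Dict Int (List Int)) (c : PySem.Set Int) : PySem.Set Int :=
  PySem.Set.union c (PySem.Set.ofList (c.foldl (fun acc u => acc ++ adj.getD u []) []))

theorem pv_mem_grow (adj : PySem.Dict Int (List Int)) (c : PySem.Set Int) (x : Int) :
    x ∈ pvGrow adj c ↔ x ∈ c ∨ ∃ u ∈ c, x ∈ adj.getD u [] := by
  unfold pvGrow
  rw [PySem.Set.mem_union, PySem.Set.mem_ofList, PySem.List.foldl_append_eq_flatMap]
  simp [List.mem_flatMap]

theorem pv_grow_congr (adj : PySem.Dict Int (List Int)) (c c' : PySem.Set Int)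
    (h : ∀ x, x ∈ c ↔ x ∈ c') (x : Int) : x ∈ pvGrow adj c ↔ x ∈ pvGrow adj c' := by
  rw [pv_mem_grow, pv_mem_grow]
  constructor
  · rintro (hx | ⟨u, hu, hx⟩)
    · exact Or.inl ((h x).1 hx)
    · exact Or.inr ⟨u, (h u).1 hu, hx⟩
  · rintro (hx | ⟨u, hu, hx⟩)
    · exact Or.inl ((h x).2 hx)
    · exact Or.inr ⟨u, (h u).2 hu, hx⟩

theorem pv_foldl_const_iterate {α : Type} (g : α → α) (l : List Nat) (c : α) :
    l.foldl (fun c _ => g c) c = g^[l.length] c := by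
  induction l generalizing c with
  | nil => rfl
  | cons a t ihl => simp only [List.foldl_cons, List.length_cons,
      Function.iterate_succ_apply, ihl]

theorem pv_sat_congr (adj : PySem.Dict Int (List Int)) :
    ∀ (k : Nat) (c c' : PySem.Set Int), (∀ x, x ∈ c ↔ x ∈ c') →
    ∀ x, x ∈ (pvGrow adj)^[k] c ↔ x ∈ (pvGrow adj)^[k] c' := by
  intro k
  induction k with
  | zero => intro c c' h x; exact h x
  | succ k ihk =>
    intro c c' h x
    rw [Function.iterate_succ_apply, Function.iterate_succ_apply]
    exact ihk _ _ (pv_grow_congr adj c c' h) x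

theorem pv_sat_fix (adj : PySem.Dict Int (List Int)) (c : PySem.Set Int)
    (h : ∀ x, x ∈ pvGrow adj c ↔ x ∈ c) :
    ∀ (k : Nat) (x : Int), x ∈ (pvGrow adj)^[k] c ↔ x ∈ c := by
  intro k
  induction k with
  | zero => intro x; rfl
  | succ k ihk =>
    intro x
    rw [Function.iterate_succ_apply]
    rw [pv_sat_congr adj k (pvGrow adj c) c h x]
    exact ihk x

theorem pv_sat_nodup (adj : PySem.Dict Int (List Int)) :
    ∀ (k : Nat) (c : PySem.Set Int), c.Nodup → ((pvGrow adj)^[k] c).Nodup := by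
  intro k
  induction k with
  | zero => intro c h; exact h
  | succ k ihk =>
    intro c h
    rw [Function.iterate_succ_apply]
    exact ihk _ (PySem.Set.nodup_union _ _ h)

theorem pv_sat_mono (adj : PySem.Dict Int (List Int)) :
    ∀ (k : Nat) (c : PySem.Set Int) (x : Int), x ∈ c → x ∈ (pvGrow adj)^[k] c := by
  intro k
  induction k with
  | zero => intro c x h; exact h
  | succ k ihk =>
    intro c x h
    rw [Function.iterate_succ_apply]
    exact ihk _ x ((pv_mem_grow adj c x).2 (Or.inl h))

theorem pv_sat_reach (adj : PySem.Dict Int (List Int)) (start : Int) :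
    ∀ (k : Nat) (c : PySem.Set Int),
    (∀ x ∈ c, Relation.ReflTransGen (fun a b => b ∈ adj.getD a []) start x) →
    ∀ x ∈ (pvGrow adj)^[k] c, Relation.ReflTransGen (fun a b => b ∈ adj.getD a []) start x := by
  intro k
  induction k with
  | zero => intro c h; exact h
  | succ k ihk =>
    intro c h
    rw [Function.iterate_succ_apply]
    refine ihk _ ?_
    intro x hx
    rcases (pv_mem_grow adj c x).1 hx with hx | ⟨u, hu, hx⟩
    · exact h x hx
    · exact Relation.ReflTransGen.tail (h u hu) hx

theorem pv_sat_closed (adj : PySem.Dict Int (List Int)) (V : List Int)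
    (hV : ∀ x w : Int, w ∈ adj.getD x [] → w ∈ V) (hVnd : V.Nodup) :
    ∀ (k : Nat) (c : PySem.Set Int), c.Nodup → (∀ x ∈ c, x ∈ V) →
    V.length ≤ k + c.length →
    ∀ u ∈ (pvGrow adj)^[k] c, ∀ w, w ∈ adj.getD u [] → w ∈ (pvGrow adj)^[k] c := by
  intro k
  induction k with
  | zero =>
    intro c hnd hcV hlen u hu w hw
    exact pv_nodup_mem_of_le_length hnd hVnd hcV (by omega) w (hV u w hw)
  | succ k ihk =>
    intro c hnd hcV hlen
    by_cases hfix : ∀ x ∈ pvGrow adj c, x ∈ c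
    · have hiff : ∀ x, x ∈ pvGrow adj c ↔ x ∈ c := by
        intro x
        exact ⟨hfix x, fun h => (pv_mem_grow adj c x).2 (Or.inl h)⟩
      intro u hu w hw
      have hu' : u ∈ c := (pv_sat_fix adj c hiff (k + 1) u).1 hu
      have hwc : w ∈ c := hfix w ((pv_mem_grow adj c w).2 (Or.inr ⟨u, hu', hw⟩))
      exact (pv_sat_fix adj c hiff (k + 1) w).2 hwc
    · push Not at hfix
      obtain ⟨y, hy, hyc⟩ := hfix
      have hgnd : (pvGrow adj c).Nodup := PySem.Set.nodup_union _ _ hnd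
      have hgV : ∀ x ∈ pvGrow adj c, x ∈ V := by
        intro x hx
        rcases (pv_mem_grow adj c x).1 hx with hx | ⟨u, _, hx⟩
        · exact hcV x hx
        · exact hV u x hx
      have hglen : c.length + 1 ≤ (pvGrow adj c).length := by
        have hdef : pvGrow adj c = c ++ List.filter (fun z => !c.contains z)
            (PySem.Set.ofList (PySem.Set.ofList
              (c.foldl (fun acc u => acc ++ adj.getD u []) []))) := by
          unfold pvGrow
          rw [show (PySem.Set.union : PySem.Set Int → PySem.Set Int → PySem.Set Int)
                = PySem.Set.update from rfl]
          exact PySem.Set.update_eq_append_filter _ _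
        have hyex : y ∈ List.filter (fun z => !c.contains z)
            (PySem.Set.ofList (PySem.Set.ofList
              (c.foldl (fun acc u => acc ++ adj.getD u []) []))) := by
          rw [hdef] at hy
          rcases List.mem_append.1 hy with h | h
          · exact absurd h hyc
          · exact h
        have hpos : 1 ≤ (List.filter (fun z => !c.contains z)
            (PySem.Set.ofList (PySem.Set.ofList
              (c.foldl (fun acc u => acc ++ adj.getD u []) [])))).length :=
          List.length_pos_of_mem hyex
        rw [hdef, List.length_append]
        omega
      rw [Function.iterate_succ_apply]
      exact ihk (pvGrow adj c) hgnd hgV (by omega)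

theorem pv_sat_reach_char (adj : PySem.Dict Int (List Int)) (V : List Int)
    (hV : ∀ x w : Int, w ∈ adj.getD x [] → w ∈ V) (hVnd : V.Nodup)
    (v0 : Int) (hv0 : v0 ∈ V) :
    (((pvGrow adj)^[V.length] (PySem.Set.add PySem.Set.empty v0)).Nodup ∧
     ∀ x, x ∈ (pvGrow adj)^[V.length] (PySem.Set.add PySem.Set.empty v0) ↔
       Relation.ReflTransGen (fun a b => b ∈ adj.getD a []) v0 x) := by
  have hc0 : (PySem.Set.add PySem.Set.empty v0) = [v0] := rfl
  have hnd0 : (PySem.Set.add PySem.Set.empty v0 : PySem.Set Int).Nodup := by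
    rw [hc0]; exact List.nodup_singleton _
  have hcV : ∀ x ∈ (PySem.Set.add PySem.Set.empty v0 : PySem.Set Int), x ∈ V := by
    rw [hc0]; intro x hx; rw [List.mem_singleton] at hx; exact hx ▸ hv0
  have hcl := pv_sat_closed adj V hV hVnd V.length (PySem.Set.add PySem.Set.empty v0)
    hnd0 hcV (by rw [hc0]; simp)
  refine ⟨pv_sat_nodup adj V.length _ hnd0, fun x => ⟨?_, ?_⟩⟩
  · refine pv_sat_reach adj v0 V.length _ ?_ x
    rw [hc0]; intro z hz; rw [List.mem_singleton] at hz
    exact hz ▸ Relation.ReflTransGen.refl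
  · intro hreach
    induction hreach with
    | refl => exact pv_sat_mono adj V.length _ v0 (by rw [hc0]; exact List.mem_singleton.2 rfl)
    | tail _ hstep ihr => exact hcl _ ihr _ hstep

-- A's DFS flood and B's saturation loop visit the same vertices whenever the two
-- adjacency dicts agree as relations, so the two size tests coincide.
theorem pv_traverse_eq (adjA adjB : PySem.Dict Int (List Int)) (V : List Int)
    (hagree : ∀ x w : Int, w ∈ adjA.getD x [] ↔ w ∈ adjB.getD x [])
    (hVA : ∀ x w : Int, w ∈ adjA.getD x [] → w ∈ V) (hVnd : V.Nodup)
    (start : Int) (hstart : start ∈ V) :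
    (pvDfsA adjA (2 * V.length) (PySem.Set.add PySem.Set.empty start) [start]).length
      = ((pvGrow adjB)^[V.length] (PySem.Set.add PySem.Set.empty start)).length := by
  have hVB : ∀ x w : Int, w ∈ adjB.getD x [] → w ∈ V :=
    fun x w h => hVA x w ((hagree x w).2 h)
  obtain ⟨nd1, hm1⟩ := pv_dfs_reach adjA V hVA start hstart
  obtain ⟨nd2, hm2⟩ := pv_sat_reach_char adjB V hVB hVnd start hstart
  have hrel : ∀ x : Int,
      Relation.ReflTransGen (fun a b => b ∈ adjA.getD a []) start x ↔
      Relation.ReflTransGen (fun a b => b ∈ adjB.getD a []) start x := by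
    intro x
    constructor
    · intro h; exact Relation.ReflTransGen.mono (fun a b hab => (hagree a b).1 hab) h
    · intro h; exact Relation.ReflTransGen.mono (fun a b hab => (hagree a b).2 hab) h
  have hperm := (List.perm_ext_iff_of_nodup nd1 nd2).2 (by
    intro x; rw [hm1 x, hm2 x]; exact hrel x)
  exact hperm.length_eq

theorem pv_sorted_pair (u w : Int) :
    PySem.List.sorted [u, w] (fun x => x) false = if u ≤ w then [u, w] else [w, u] := by
  rw [PySem.List.sorted_eq_foldl_insertBy]
  simp only [List.foldl_cons, List.foldl_nil]
  simp only [PySem.List.insertBy]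
  by_cases h : w < u
  · rw [if_pos (by simpa using h), if_neg (by omega)]
  · rw [if_neg (by simpa using h), if_pos (by omega)]

theorem pv_getD_foldl_insert_const {ν : Type} (c : ν) (l : List Int) :
    ∀ (d : PySem.Dict Int ν), (∀ x, d.getD x c = c) →
    ∀ x, (l.foldl (fun d v => d.insert v c) d).getD x c = c := by
  induction l with
  | nil => intro d h x; exact h x
  | cons a t ih =>
    intro d h x
    simp only [List.foldl_cons]
    refine ih _ ?_ x
    intro y
    rw [PySem.Dict.getD_insert]
    split_ifs with h'
    · rfl
    · exact h y

theorem pv_update_of_subset (s : PySem.Set Int) (xs : List Int) (h : ∀ x ∈ xs, x ∈ s) :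
    PySem.Set.update s xs = s := by
  rw [PySem.Set.update_eq_append_filter]
  have : List.filter (fun y => !s.contains y) (PySem.Set.ofList xs) = [] := by
    rw [List.filter_eq_nil_iff]
    intro y hy
    have : y ∈ s := h y ((PySem.Set.mem_ofList _ _).1 hy)
    simp [PySem.Set.contains_eq_listContains, this]
  rw [this, List.append_nil]

-- appended work: link-level characterizations
def pvOppL (v : Int) (f : Int × Int × Int) : List Int :=
  [f.1, f.2.1, f.2.2].filter (fun x => x ≠ v)

def pvOppPair (v : Int) (f : Int × Int × Int) : Int × Int :=
  ((pvOppL v f).getD 0 0, (pvOppL v f).getD 1 0)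

def pvEPair (e : List Int) : List Int := [e.getD 0 0, e.getD 1 0]

def pvPPairsL (e : List Int) : List (Int × Int) :=
  [(e.getD 0 0, e.getD 1 0), (e.getD 1 0, e.getD 0 0)]

def pvPPairsP (e : Int × Int) : List (Int × Int) := [(e.1, e.2), (e.2, e.1)]

def pvAdj0 (V : List Int) : PySem.Dict Int (List Int) :=
  V.foldl (fun d x => d.insert x []) PySem.Dict.empty

def pvSortedOpp (v : Int) (f : Int × Int × Int) : List Int :=
  PySem.List.sorted (pvOppL v f) (fun x => x) false

def pvAdjA (v : Int) (fs : List (Int × Int × Int)) : PySem.Dict Int (List Int) :=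
  ((fs.map (pvSortedOpp v)).flatMap pvPPairsL).foldl
    (fun d p => d.modify p.1 [] (· ++ [p.2]))
    (pvAdj0 (PySem.Set.ofList (fs.flatMap (pvOppL v))))

def pvAdjB (v : Int) (fs : List (Int × Int × Int)) : PySem.Dict Int (List Int) :=
  ((fs.map (pvOppPair v)).flatMap pvPPairsP).foldl
    (fun d p => d.modify p.1 [] (· ++ [p.2]))
    (pvAdj0 (PySem.Set.ofList (fs.flatMap (pvOppL v))))

theorem pv_shape_sorted (v : Int) (f : Int × Int × Int) {u w : Int}
    (h : pvOppL v f = [u, w]) :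
    pvSortedOpp v f = if u ≤ w then [u, w] else [w, u] := by
  rw [pvSortedOpp, h, pv_sorted_pair]

theorem pv_flatMap_map {α β γ : Type} (l : List α) (f : α → β) (g : β → List γ) :
    (l.map f).flatMap g = l.flatMap (fun x => g (f x)) := by
  induction l with
  | nil => rfl
  | cons a t ih => simp [List.flatMap_cons, ih]

-- the stream of link-edge endpoints A increments degrees over, counted
theorem pv_countA (v : Int) (fs : List (Int × Int × Int))
    (hfs : ∀ f ∈ fs, ∃ u w : Int, u ≠ w ∧ pvOppL v f = [u, w]) (x : Int) :
    ((fs.map (pvSortedOpp v)).flatMap pvEPair).count x = (fs.flatMap (pvOppL v)).count x := by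
  rw [pv_flatMap_map, List.count_flatMap, List.count_flatMap]
  congr 1
  refine List.map_congr_left ?_
  intro f hf
  obtain ⟨u, w, hne, he⟩ := hfs f hf
  have hs := pv_shape_sorted v f he
  simp only [Function.comp_apply]
  by_cases huw : u ≤ w
  · rw [hs, if_pos huw, he]; rfl
  · rw [hs, if_neg huw, he]
    show List.count x [w, u] = List.count x [u, w]
    simp [List.count_cons]
    omega


-- A's first loop: collect link edges and link vertices
theorem pv_foldA_pair (v : Int) (fs : List (Int × Int × Int)) :
    ∀ (acc1 : List (List Int)) (acc2 : PySem.Set Int),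
    fs.foldl (fun (st : List (List Int) × PySem.Set Int) f =>
      (st.1 ++ [PySem.List.sorted ([f.1, f.2.1, f.2.2].filter (fun x => x ≠ v)) (fun x => x) false],
       PySem.Set.update st.2 ([f.1, f.2.1, f.2.2].filter (fun x => x ≠ v)))) (acc1, acc2)
      = (acc1 ++ fs.map (pvSortedOpp v), PySem.Set.update acc2 (fs.flatMap (pvOppL v))) := by
  induction fs with
  | nil => intro acc1 acc2; simp
  | cons f t ih =>
    intro acc1 acc2
    simp only [List.foldl_cons, List.map_cons, List.flatMap_cons]
    rw [ih]
    rw [PySem.Set.update_append]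
    simp [pvSortedOpp, pvOppL]

-- A's link_is_cycle in closed form
theorem pv_linkA_char (v : Int) (fs : List (Int × Int × Int))
    (hfs : ∀ f ∈ fs, ∃ u w : Int, u ≠ w ∧ pvOppL v f = [u, w]) :
    pvLinkIsCycleA v fs =
      (if ((PySem.Set.ofList (fs.flatMap (pvOppL v))).map
            (fun k => ((fs.flatMap (pvOppL v)).count k : Int))).any (fun d => d ≠ 2) then false
       else
        match PySem.Set.ofList (fs.flatMap (pvOppL v)) with
        | [] => false
        | start :: _ =>
          (pvDfsA (pvAdjA v fs)
              (2 * (PySem.Set.ofList (fs.flatMap (pvOppL v))).length)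
              (PySem.Set.add PySem.Set.empty start) [start]).length
            == (PySem.Set.ofList (fs.flatMap (pvOppL v))).length) := by
  unfold pvLinkIsCycleA
  dsimp only []
  rw [pv_foldA_pair v fs [] PySem.Set.empty]
  dsimp only []
  rw [List.nil_append]
  rw [show PySem.Set.update PySem.Set.empty (fs.flatMap (pvOppL v))
      = PySem.Set.ofList (fs.flatMap (pvOppL v)) from PySem.Set.update_nil_left _]
  set oppS := fs.flatMap (pvOppL v) with hoppS
  set LV := PySem.Set.ofList oppS with hLV
  set LE := fs.map (pvSortedOpp v) with hLE
  -- shapes of the link edges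
  have hLE2 : ∀ e ∈ LE, ∃ a b : Int, e = [a, b] := by
    intro e he
    rw [hLE] at he
    obtain ⟨f, hf, rfl⟩ := List.mem_map.1 he
    obtain ⟨u, w, hne, hef⟩ := hfs f hf
    have hs := pv_shape_sorted v f hef
    by_cases huw : u ≤ w
    · exact ⟨u, w, by rw [hs, if_pos huw]⟩
    · exact ⟨w, u, by rw [hs, if_neg huw]⟩
  have hLVnd : LV.Nodup := PySem.Set.nodup_ofList _
  -- deg as a flat modify loop
  rw [PySem.List.foldl_congr_mem (l := LE)
    (f := fun (d : PySem.Dict Int Int) (e : List Int) => match e with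
      | [a, b] => (PySem.Dict.modify d a 0 (· + 1)).modify b 0 (· + 1)
      | _ => d)
    (g := fun (d : PySem.Dict Int Int) (e : List Int) =>
      (pvEPair e).foldl (fun d x => d.modify x 0 (· + 1)) d)
    (init := LV.foldl (fun d v => d.insert v (0 : Int)) PySem.Dict.empty)
    (by
      intro acc e he
      obtain ⟨a, b, rfl⟩ := hLE2 e he
      rfl)]
  rw [← List.foldl_flatMap]
  -- its keys and values
  have hdeg0keys : (LV.foldl (fun d v => d.insert v (0 : Int)) PySem.Dict.empty).keys = LV := by
    rw [PySem.Dict.keys_foldl_insert (f := fun _ _ => (0 : Int))]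
    show PySem.Set.update [] LV = LV
    rw [PySem.Set.update_nil_left]
    exact PySem.Set.ofList_eq_self_of_nodup _ hLVnd
  have hstream_sub : ∀ x ∈ LE.flatMap pvEPair, x ∈ LV := by
    intro x hx
    obtain ⟨e, he, hxe⟩ := List.mem_flatMap.1 hx
    obtain ⟨a, b, rfl⟩ := hLE2 e he
    rw [hLE] at he
    obtain ⟨f, hf, hfe⟩ := List.mem_map.1 he
    have hxe' : x ∈ ([a, b] : List Int) := by
      have hred : pvEPair [a, b] = [a, b] := rfl
      rw [hred] at hxe
      exact hxe
    have hxs : x ∈ pvSortedOpp v f := by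
      rw [hfe]
      exact hxe'
    have hxo : x ∈ pvOppL v f := ((PySem.List.sorted_perm _ _ _).mem_iff).1 hxs
    rw [hLV, PySem.Set.mem_ofList, hoppS]
    exact List.mem_flatMap.2 ⟨f, hf, hxo⟩
  have hdegkeys : ((LE.flatMap pvEPair).foldl (fun d x => d.modify x 0 (· + 1))
      (LV.foldl (fun d v => d.insert v (0 : Int)) PySem.Dict.empty)).keys = LV := by
    rw [PySem.Dict.keys_foldl_modify (f := fun _ _ v => v + 1), hdeg0keys]
    exact pv_update_of_subset _ _ hstream_sub
  have hdeg0getD : ∀ x : Int, (LV.foldl (fun d v => d.insert v (0 : Int))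
      PySem.Dict.empty).getD x 0 = 0 :=
    pv_getD_foldl_insert_const (0 : Int) LV PySem.Dict.empty (fun x => rfl)
  have hvals : ((LE.flatMap pvEPair).foldl (fun d x => d.modify x 0 (· + 1))
      (LV.foldl (fun d v => d.insert v (0 : Int)) PySem.Dict.empty)).values
      = LV.map (fun k => (oppS.count k : Int)) := by
    show (((LE.flatMap pvEPair).foldl (fun d x => d.modify x 0 (· + 1))
      (LV.foldl (fun d v => d.insert v (0 : Int)) PySem.Dict.empty)).items.map Prod.snd) = _
    rw [PySem.Dict.items_eq_map_keys _ (by rw [hdegkeys]; exact hLVnd) 0, hdegkeys, List.map_map]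
    refine List.map_congr_left ?_
    intro k hk
    simp only [Function.comp_apply]
    rw [PySem.Dict.getD_foldl_modify_add_one, hdeg0getD, zero_add, hLE, pv_countA v fs hfs k]
  rw [hvals]
  -- both branches now line up
  by_cases hany : (LV.map (fun k => (oppS.count k : Int))).any (fun d => d ≠ 2)
  · rw [if_pos hany, if_pos hany]
  · rw [if_neg hany, if_neg hany]
    -- adjacency dict
    rw [PySem.List.foldl_congr_mem (l := LE)
      (f := fun (d : PySem.Dict Int (List Int)) (e : List Int) => match e with
        | [a, b] => (PySem.Dict.modify d a [] (· ++ [b])).modify b [] (· ++ [a])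
        | _ => d)
      (g := fun (d : PySem.Dict Int (List Int)) (e : List Int) =>
        (pvPPairsL e).foldl (fun d p => d.modify p.1 [] (· ++ [p.2])) d)
      (init := LV.foldl (fun d v => d.insert v ([] : List Int)) PySem.Dict.empty)
      (by
        intro acc e he
        obtain ⟨a, b, rfl⟩ := hLE2 e he
        rfl)]
    rw [← List.foldl_flatMap]
    rfl

-- B's first loop: degree dict and link edges in one pass
theorem pv_foldB_pair (v : Int) (fs : List (Int × Int × Int))
    (hfs : ∀ f ∈ fs, ∃ u w : Int, u ≠ w ∧ pvOppL v f = [u, w]) :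
    ∀ (acc1 : PySem.Dict Int Int) (acc2 : List (Int × Int)),
    fs.foldl (fun (st : PySem.Dict Int Int × List (Int × Int)) f =>
      match [f.1, f.2.1, f.2.2].filter (fun x => x ≠ v) with
      | [u, w] =>
          let d1 := st.1.insert u (st.1.getD u 0 + 1)
          let d2 := d1.insert w (d1.getD w 0 + 1)
          (d2, st.2 ++ [(u, w)])
      | _ => st) (acc1, acc2)
      = ((fs.flatMap (pvOppL v)).foldl (fun d x => d.insert x (d.getD x 0 + 1)) acc1,
         acc2 ++ fs.map (pvOppPair v)) := by
  induction fs with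
  | nil => intro acc1 acc2; simp
  | cons f t ih =>
    intro acc1 acc2
    obtain ⟨u, w, hne, hef⟩ := hfs f (List.mem_cons_self ..)
    have hef' : [f.1, f.2.1, f.2.2].filter (fun x => x ≠ v) = [u, w] := hef
    have hpp : pvOppPair v f = (u, w) := by
      rw [pvOppPair, hef]; rfl
    simp only [List.foldl_cons, List.map_cons, List.flatMap_cons, hef']
    rw [ih (fun g hg => hfs g (List.mem_cons_of_mem _ hg))]
    rw [List.foldl_append, hpp, hef]
    simp

-- B's link check in closed form
theorem pv_linkB_char (v : Int) (fs : List (Int × Int × Int))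
    (hfs : ∀ f ∈ fs, ∃ u w : Int, u ≠ w ∧ pvOppL v f = [u, w]) :
    pvLinkIsCycleB v fs =
      (if ((PySem.Set.ofList (fs.flatMap (pvOppL v))).map
            (fun k => ((fs.flatMap (pvOppL v)).count k : Int))).any (fun d => d ≠ 2) then false
       else
        match PySem.Set.ofList (fs.flatMap (pvOppL v)) with
        | [] => false
        | v0 :: _ =>
          ((pvGrow (pvAdjB v fs))^[(PySem.Set.ofList (fs.flatMap (pvOppL v))).length]
              (PySem.Set.add PySem.Set.empty v0)).length
            == (PySem.Set.ofList (fs.flatMap (pvOppL v))).length) := by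
  unfold pvLinkIsCycleB
  dsimp only []
  rw [pv_foldB_pair v fs hfs PySem.Dict.empty []]
  dsimp only []
  rw [List.nil_append]
  set oppS := fs.flatMap (pvOppL v) with hoppS
  set LV := PySem.Set.ofList oppS with hLV
  have hLVnd : LV.Nodup := PySem.Set.nodup_ofList _
  have hdkeys : (oppS.foldl (fun d x => d.insert x (d.getD x 0 + 1))
      (PySem.Dict.empty : PySem.Dict Int Int)).keys = LV := by
    rw [PySem.Dict.keys_foldl_insert (f := fun d x => d.getD x 0 + 1)]
    show PySem.Set.update [] oppS = LV
    rw [PySem.Set.update_nil_left]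
  have hvals : (oppS.foldl (fun d x => d.insert x (d.getD x 0 + 1))
      (PySem.Dict.empty : PySem.Dict Int Int)).values
      = LV.map (fun k => (oppS.count k : Int)) := by
    simp only [PySem.Dict.values]
    rw [PySem.Dict.items_eq_map_keys _ (by rw [hdkeys]; exact hLVnd) 0, hdkeys, List.map_map]
    refine List.map_congr_left ?_
    intro k hk
    simp only [Function.comp_apply]
    rw [PySem.Dict.getD_foldl_insert_add_one]
    show (0 : Int) + oppS.count k = _
    rw [zero_add]
  simp only [hvals, hdkeys]
  by_cases hany : (LV.map (fun k => (oppS.count k : Int))).any (fun d => d ≠ 2)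
  · rw [if_pos hany, if_pos hany]
  · rw [if_neg hany, if_neg hany]
    rw [show (fun (d : PySem.Dict Int (List Int)) (e : Int × Int) =>
          (d.modify e.1 [] (· ++ [e.2])).modify e.2 [] (· ++ [e.1]))
        = (fun (d : PySem.Dict Int (List Int)) (e : Int × Int) =>
          (pvPPairsP e).foldl (fun d p => d.modify p.1 [] (· ++ [p.2])) d) from rfl]
    rw [← List.foldl_flatMap]
    have hadjB : List.foldl (fun d p => d.modify p.1 [] (· ++ [p.2]))
        (List.foldl (fun (d : PySem.Dict Int (List Int)) x => d.insert x [])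
          PySem.Dict.empty LV)
        (List.flatMap pvPPairsP (List.map (pvOppPair v) fs)) = pvAdjB v fs := by
      rw [hLV, hoppS]; rfl
    rw [hadjB]
    rw [show (fun (comp : PySem.Set Int) (_ : Nat) =>
          PySem.Set.union comp (PySem.Set.ofList
            (comp.foldl (fun acc u => acc ++ (pvAdjB v fs).getD u []) [])))
        = (fun (c : PySem.Set Int) (_ : Nat) => pvGrow (pvAdjB v fs) c) from rfl]
    clear_value LV
    cases LV with
    | nil => rfl
    | cons v0 tail =>
      dsimp only []
      rw [pv_foldl_const_iterate (g := pvGrow (pvAdjB v fs))]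
      rw [List.length_range]

theorem pv_adj0_getD (V : List Int) (x : Int) : (pvAdj0 V).getD x [] = [] := by
  unfold pvAdj0
  exact pv_getD_foldl_insert_const ([] : List Int) V PySem.Dict.empty (fun _ => rfl) x

theorem pv_adj_mem (stream : List (Int × Int)) (V : List Int) (x w : Int) :
    w ∈ (stream.foldl (fun d p => d.modify p.1 [] (· ++ [p.2])) (pvAdj0 V)).getD x []
      ↔ (x, w) ∈ stream := by
  rw [PySem.Dict.getD_foldl_modify_append, pv_adj0_getD, List.nil_append]
  simp only [List.mem_map, List.mem_filter]
  constructor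
  · rintro ⟨p, ⟨hp, hpx⟩, rfl⟩
    have : p.1 = x := by simpa using hpx
    have : p = (x, p.2) := by rw [← this]
    rw [← this]; exact hp
  · intro h
    exact ⟨(x, w), ⟨h, by simp⟩, rfl⟩

theorem pv_adjA_mem (v : Int) (fs : List (Int × Int × Int)) (x w : Int) :
    w ∈ (pvAdjA v fs).getD x [] ↔
      (x, w) ∈ (fs.map (pvSortedOpp v)).flatMap pvPPairsL := by
  unfold pvAdjA
  exact pv_adj_mem _ _ x w

theorem pv_adjB_mem (v : Int) (fs : List (Int × Int × Int)) (x w : Int) :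
    w ∈ (pvAdjB v fs).getD x [] ↔
      (x, w) ∈ (fs.map (pvOppPair v)).flatMap pvPPairsP := by
  unfold pvAdjB
  exact pv_adj_mem _ _ x w

theorem pv_streams_agree (v : Int) (fs : List (Int × Int × Int))
    (hfs : ∀ f ∈ fs, ∃ u w : Int, u ≠ w ∧ pvOppL v f = [u, w]) (p : Int × Int) :
    p ∈ (fs.map (pvSortedOpp v)).flatMap pvPPairsL ↔
      p ∈ (fs.map (pvOppPair v)).flatMap pvPPairsP := by
  rw [pv_flatMap_map, pv_flatMap_map]
  simp only [List.mem_flatMap]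
  constructor
  · rintro ⟨f, hf, hp⟩
    refine ⟨f, hf, ?_⟩
    obtain ⟨u, w, hne, he⟩ := hfs f hf
    have hs := pv_shape_sorted v f he
    have hpp : pvOppPair v f = (u, w) := by rw [pvOppPair, he]; rfl
    rw [hpp]
    by_cases huw : u ≤ w
    · rw [hs, if_pos huw] at hp
      exact hp
    · rw [hs, if_neg huw] at hp
      show p ∈ [(u, w), (w, u)]
      have hthis : p ∈ ([(w, u), (u, w)] : List (Int × Int)) := hp
      simp only [List.mem_cons, List.not_mem_nil, or_false] at hthis ⊢
      tauto
  · rintro ⟨f, hf, hp⟩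
    refine ⟨f, hf, ?_⟩
    obtain ⟨u, w, hne, he⟩ := hfs f hf
    have hs := pv_shape_sorted v f he
    have hpp : pvOppPair v f = (u, w) := by rw [pvOppPair, he]; rfl
    rw [hpp] at hp
    by_cases huw : u ≤ w
    · rw [hs, if_pos huw]
      exact hp
    · rw [hs, if_neg huw]
      show p ∈ [(w, u), (u, w)]
      have hp' : p ∈ ([(u, w), (w, u)] : List (Int × Int)) := hp
      simp only [List.mem_cons, List.not_mem_nil, or_false] at hp' ⊢
      tauto

theorem pv_adjA_target (v : Int) (fs : List (Int × Int × Int))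
    (hfs : ∀ f ∈ fs, ∃ u w : Int, u ≠ w ∧ pvOppL v f = [u, w]) (x w : Int)
    (h : w ∈ (pvAdjA v fs).getD x []) : w ∈ PySem.Set.ofList (fs.flatMap (pvOppL v)) := by
  rw [pv_adjA_mem, pv_flatMap_map] at h
  obtain ⟨f, hf, hp⟩ := List.mem_flatMap.1 h
  obtain ⟨u, w', hne, he⟩ := hfs f hf
  have hs := pv_shape_sorted v f he
  rw [PySem.Set.mem_ofList]
  have hmem : w ∈ pvOppL v f → w ∈ fs.flatMap (pvOppL v) :=
    fun ho => List.mem_flatMap.2 ⟨f, hf, ho⟩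
  refine hmem ?_
  rw [he]
  by_cases huw : u ≤ w'
  · rw [hs, if_pos huw] at hp
    have hp' : (x, w) = ((u : Int), (w' : Int)) ∨ (x, w) = (w', u) := by
      have : (x, w) ∈ ([(u, w'), (w', u)] : List (Int × Int)) := hp
      simpa only [List.mem_cons, List.not_mem_nil, or_false] using this
    rcases hp' with h' | h' <;> (simp only [Prod.mk.injEq] at h'; simp [h'.2])
  · rw [hs, if_neg huw] at hp
    have hp' : (x, w) = ((w' : Int), (u : Int)) ∨ (x, w) = (u, w') := by
      have : (x, w) ∈ ([(w', u), (u, w')] : List (Int × Int)) := hp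
      simpa only [List.mem_cons, List.not_mem_nil, or_false] using this
    rcases hp' with h' | h' <;> (simp only [Prod.mk.injEq] at h'; simp [h'.2])

-- the two link checks agree on every well-shaped face list
theorem pv_link_eq (v : Int) (fs : List (Int × Int × Int))
    (hfs : ∀ f ∈ fs, ∃ u w : Int, u ≠ w ∧ pvOppL v f = [u, w]) :
    pvLinkIsCycleA v fs = pvLinkIsCycleB v fs := by
  rw [pv_linkA_char v fs hfs, pv_linkB_char v fs hfs]
  by_cases hany : ((PySem.Set.ofList (fs.flatMap (pvOppL v))).map
      (fun k => ((fs.flatMap (pvOppL v)).count k : Int))).any (fun d => d ≠ 2)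
  · rw [if_pos hany, if_pos hany]
  · rw [if_neg hany, if_neg hany]
    have hnd : (PySem.Set.ofList (fs.flatMap (pvOppL v))).Nodup := PySem.Set.nodup_ofList _
    have hagree : ∀ x w : Int, w ∈ (pvAdjA v fs).getD x [] ↔ w ∈ (pvAdjB v fs).getD x [] := by
      intro x w
      rw [pv_adjA_mem, pv_adjB_mem]
      exact pv_streams_agree v fs hfs (x, w)
    have htarget : ∀ x w : Int, w ∈ (pvAdjA v fs).getD x [] →
        w ∈ PySem.Set.ofList (fs.flatMap (pvOppL v)) := pv_adjA_target v fs hfs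
    cases hLVc : PySem.Set.ofList (fs.flatMap (pvOppL v)) with
    | nil => rfl
    | cons start tail =>
      dsimp only []
      have hlen := pv_traverse_eq (pvAdjA v fs) (pvAdjB v fs) (start :: tail)
        (fun x w => hagree x w)
        (fun x w h => hLVc ▸ htarget x w h)
        (hLVc ▸ hnd) start (List.mem_cons_self ..)
      rw [hlen]


theorem pv_witness_ok :
    Dom_verify_manifold pvWitness_verify_manifold.1 pvWitness_verify_manifold.2 ∧
    Pre_verify_manifold pvWitness_verify_manifold.1 pvWitness_verify_manifold.2 := by
  decide


-- ===== outer assembly =====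
theorem pv_foldEdgesA (fs : List (Int × Int × Int)) :
    ∀ (acc1 : PySem.Set (Int × Int)) (acc2 : PySem.Dict (Int × Int) Int),
    fs.foldl (fun (st : PySem.Set (Int × Int) × PySem.Dict (Int × Int) Int) f =>
      [(f.1, f.2.1), (f.2.1, f.2.2), (f.1, f.2.2)].foldl
        (fun (st : PySem.Set (Int × Int) × PySem.Dict (Int × Int) Int) uv =>
          let e := pvSortPair uv.1 uv.2
          (PySem.Set.add st.1 e, st.2.insert e (st.2.getD e 0 + 1))) st) (acc1, acc2)
    = ((pvEdgeStream fs).foldl PySem.Set.add acc1,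
       (pvEdgeStream fs).foldl (fun d e => d.insert e (d.getD e 0 + 1)) acc2) := by
  induction fs with
  | nil => intro acc1 acc2; rfl
  | cons f t ih =>
    intro acc1 acc2
    exact ih _ _

theorem pv_foldEdgesB (fs : List (Int × Int × Int)) :
    ∀ (acc : PySem.Dict (Int × Int) Int),
    fs.foldl (fun (d : PySem.Dict (Int × Int) Int) f =>
      [(f.1, f.2.1), (f.2.1, f.2.2), (f.1, f.2.2)].foldl
        (fun d uv =>
          let e := if uv.1 ≤ uv.2 then uv else (uv.2, uv.1)
          d.insert e (d.getD e 0 + 1)) d) acc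
    = (pvEdgeStream fs).foldl (fun d e => d.insert e (d.getD e 0 + 1)) acc := by
  induction fs with
  | nil => intro acc; rfl
  | cons f t ih =>
    intro acc
    exact ih _

theorem pv_all_congr {α : Type} (l : List α) (p q : α → Bool)
    (h : ∀ x ∈ l, p x = q x) : l.all p = l.all q := by
  induction l with
  | nil => rfl
  | cons a t ih => simp_all [List.all_cons]

theorem pv_incident_getD :
    ∀ (fs : List (Int × Int × Int)) (d : PySem.Dict Int (List (Int × Int × Int))) (v : Int),
    (∀ f ∈ fs, f.1 ≠ f.2.1 ∧ f.2.1 ≠ f.2.2 ∧ f.1 ≠ f.2.2) →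
    (fs.foldl (fun d f => [f.1, f.2.1, f.2.2].foldl
        (fun d x => d.modify x [] (· ++ [f])) d) d).getD v []
      = d.getD v [] ++ fs.filter (fun f => v = f.1 ∨ v = f.2.1 ∨ v = f.2.2) := by
  intro fs
  induction fs with
  | nil => intro d v h; simp
  | cons f t ih =>
    intro d v h
    refine (ih (((d.modify f.1 [] (· ++ [f])).modify f.2.1 [] (· ++ [f])).modify f.2.2
      [] (· ++ [f])) v (fun g hg => h g (List.mem_cons_of_mem _ hg))).trans ?_
    obtain ⟨h1, h2, h3⟩ := h f (List.mem_cons_self ..)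
    have hstep : (((d.modify f.1 [] (· ++ [f])).modify f.2.1 [] (· ++ [f])).modify f.2.2
          [] (· ++ [f])).getD v []
        = d.getD v [] ++ (if v = f.1 ∨ v = f.2.1 ∨ v = f.2.2 then [f] else []) := by
      simp only [PySem.Dict.getD_modify]
      by_cases e1 : v = f.1 <;> by_cases e2 : v = f.2.1 <;> by_cases e3 : v = f.2.2 <;>
        simp_all
    rw [hstep]
    by_cases hp : v = f.1 ∨ v = f.2.1 ∨ v = f.2.2
    · rw [if_pos hp, List.filter_cons, if_pos (decide_eq_true hp)]
      simp
    · rw [if_neg hp, List.filter_cons, if_neg (by simpa using hp)]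
      simp

theorem pv_counter_values (E : List (Int × Int)) :
    (PySem.Dict.counter E).values
      = (PySem.Set.ofList E).map (fun k => (E.count k : Int)) := by
  simp only [PySem.Dict.values, PySem.Dict.items_counter, List.map_map]
  rfl

theorem pv_allA_iff (E : List (Int × Int)) :
    ((PySem.Dict.counter E).values.all (fun c => c == 2)) = true
      ↔ ∀ e ∈ E, E.count e = 2 := by
  rw [pv_counter_values, List.all_eq_true]
  constructor
  · intro hh e he
    have := hh _ (List.mem_map.2 ⟨e, (PySem.Set.mem_ofList _ _).2 he, rfl⟩)
    have h2 : ((E.count e : Int)) = 2 := by simpa using this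
    exact_mod_cast h2
  · intro hh x hx
    obtain ⟨k, hk, rfl⟩ := List.mem_map.1 hx
    have := hh k ((PySem.Set.mem_ofList _ _).1 hk)
    simp [this]

theorem pv_anyB_iff (E : List (Int × Int)) :
    ((PySem.Dict.counter E).values.any (fun c => decide (c ≠ 2))) = true
      ↔ ¬ (∀ e ∈ E, E.count e = 2) := by
  rw [pv_counter_values, List.any_eq_true]
  constructor
  · rintro ⟨x, hx, hdx⟩ hall
    obtain ⟨k, hk, rfl⟩ := List.mem_map.1 hx
    have := hall k ((PySem.Set.mem_ofList _ _).1 hk)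
    simp [this] at hdx
  · intro hnall
    rcases not_forall.1 hnall with ⟨e, hne⟩
    rcases Classical.not_imp.1 hne with ⟨he, hcnt⟩
    refine ⟨(E.count e : Int), List.mem_map.2 ⟨e, (PySem.Set.mem_ofList _ _).2 he, rfl⟩, ?_⟩
    simp only [ne_eq, decide_eq_true_eq]
    exact_mod_cast hcnt

theorem pv_main (fs : List (Int × Int × Int)) (N : Int)
    (hpre : Pre_verify_manifold fs N) :
    verify_manifold fs N = verify_manifold_alt fs N := by
  unfold verify_manifold verify_manifold_alt
  dsimp only []
  rw [pv_foldEdgesA fs PySem.Set.empty PySem.Dict.empty]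
  rw [pv_foldEdgesB fs PySem.Dict.empty]
  dsimp only []
  have hecA : (pvEdgeStream fs).foldl
      (fun (d : PySem.Dict (Int × Int) Int) e => d.insert e (d.getD e 0 + 1))
      PySem.Dict.empty = PySem.Dict.counter (pvEdgeStream fs) :=
    PySem.Dict.foldl_insert_getD_add_one_eq_counter (pvEdgeStream fs)
  rw [hecA]
  have hedges : (pvEdgeStream fs).foldl PySem.Set.add PySem.Set.empty
      = PySem.Set.ofList (pvEdgeStream fs) := by
    rw [PySem.Set.ofList_eq_foldl]
    rfl
  rw [hedges]
  set E := pvEdgeStream fs with hE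
  by_cases hq : ∀ e ∈ E, E.count e = 2
  · have hcondA : ¬ ¬ (((PySem.Dict.counter E).values.all (fun c => c == 2)) = true) :=
      not_not_intro ((pv_allA_iff E).2 hq)
    rw [if_neg (c := ¬((PySem.Dict.counter E).values.all (fun c => c == 2)) = true)
      (not_not_intro ((pv_allA_iff E).2 hq))]
    rw [if_neg (c := ((PySem.Dict.counter E).values.any (fun c => decide (c ≠ 2))) = true) (by
      intro hc
      exact (pv_anyB_iff E).1 hc hq)]
    have hsize : (PySem.Dict.counter E).size = (PySem.Set.ofList E).length := by
      simp only [PySem.Dict.size, PySem.Dict.items_counter, List.length_map]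
    rw [hsize]
    have heven : Even (N * (N - 1)) := by
      have h := Int.even_mul_succ_self (N - 1)
      have h2 : (N - 1) * (N - 1 + 1) = N * (N - 1) := by ring
      rwa [h2] at h
    have hkey : (((PySem.Set.ofList E).length : Int) = PySem.Int.floordiv (N * (N - 1)) 2)
        ↔ 2 * ((PySem.Set.ofList E).length : Int) = N * (N - 1) := by
      rw [eq_comm, PySem.Int.floordiv_eq_iff_of_pos (by norm_num : (0:Int) < 2)]
      obtain ⟨k, hk⟩ := heven
      omega
    by_cases hlen : 2 * ((PySem.Set.ofList E).length : Int) = N * (N - 1)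
    · rw [if_neg (c := ((PySem.Set.ofList E).length : Int) ≠ PySem.Int.floordiv (N * (N - 1)) 2)
        (not_not_intro (hkey.2 hlen)),
        if_neg (c := 2 * ((PySem.Set.ofList E).length : Int) ≠ N * (N - 1))
        (not_not_intro hlen)]
      obtain ⟨hgood, hN1⟩ := hpre ⟨hq, hlen⟩
      refine pv_all_congr _ _ _ ?_
      intro v hv
      rw [pv_incident_getD fs _ v (fun f hf => (hgood f hf).1)]
      rw [pv_getD_foldl_insert_const ([] : List (Int × Int × Int))
        (PySem.List.pyRange 0 N) PySem.Dict.empty (fun _ => rfl) v]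
      rw [List.nil_append]
      refine pv_link_eq v _ ?_
      intro f hf
      have hfm := List.mem_filter.1 hf
      obtain ⟨hd1, hd2, hd3⟩ := (hgood f hfm.1).1
      have hp : v = f.1 ∨ v = f.2.1 ∨ v = f.2.2 := of_decide_eq_true hfm.2
      rcases hp with hp | hp | hp
      · refine ⟨f.2.1, f.2.2, hd2, ?_⟩
        subst hp
        simp only [pvOppL, List.filter]
        rw [decide_eq_false (by simp), decide_eq_true (by
          simpa using Ne.symm hd1), decide_eq_true (by simpa using Ne.symm hd3)]
      · refine ⟨f.1, f.2.2, hd3, ?_⟩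
        subst hp
        simp only [pvOppL, List.filter]
        rw [decide_eq_true (by simpa using hd1), decide_eq_false (by simp),
          decide_eq_true (by simpa using Ne.symm hd2)]
      · refine ⟨f.1, f.2.1, hd1, ?_⟩
        subst hp
        simp only [pvOppL, List.filter]
        rw [decide_eq_true (by simpa using hd3), decide_eq_true (by simpa using hd2),
          decide_eq_false (by simp)]
    · rw [if_pos (c := ((PySem.Set.ofList E).length : Int) ≠ PySem.Int.floordiv (N * (N - 1)) 2)
        (fun hc => hlen (hkey.1 hc)),
        if_pos (c := 2 * ((PySem.Set.ofList E).length : Int) ≠ N * (N - 1)) hlen]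
  · rw [if_pos (c := ¬((PySem.Dict.counter E).values.all (fun c => c == 2)) = true)
      (fun hc => hq ((pv_allA_iff E).1 hc)),
      if_pos (c := ((PySem.Dict.counter E).values.any (fun c => decide (c ≠ 2))) = true)
      ((pv_anyB_iff E).2 hq)]

-- ===== VERDICT (by name: the statement is the Claim_ definition above) =====
theorem verify_manifold_spec : Claim_equal_verify_manifold := by
  intro unique_faces N _hdom hpre
  unfold Spec_verify_manifold
  exact pv_main unique_faces N hpre
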